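-- pv_equiv track=rewrite | github.com/rivten/aoc-2024 | 04/nicolas-lair/part1.py | get_diag_south_east
-- ===== SOURCE A (Python) =====
-- def get_diag_south_east(lines, cols):
--     diag_down = []
--     for i in range(len(lines) - 1, 0 , -1):
--         elt = ''
--         for col_idx, line_idx in enumerate(range(i, len(lines))):
--             elt += lines[line_idx][col_idx]
--         diag_down.append(elt)
--     for i in range(len(cols)):
--         elt = ''
--         for line_idx, col_idx in enumerate(range(i, len(cols))):
--             elt += lines[line_idx][col_idx]
--         diag_down.append(elt)
--     return diag_down
-- ===== SOURCE B (Python) =====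
-- def get_diag_south_east(lines, cols):
--     n, m = len(lines), len(cols)
--     buckets = {}
--     for r in range(n):
--         row = lines[r]
--         for c in range(m):
--             buckets.setdefault(r - c, []).append(row[c])
--     return [''.join(buckets.get(d, [])) for d in range(n - 1, -m, -1)]
-- ===== Notes on version B (the rewrite author's own statement) =====
-- stated objective: idiomatic
-- what changed: Replaces A's two per-diagonal scan loops by a single row-major pass over the n-by-m grid that appends each cell to a dict bucket keyed by r-c, then reads the buckets out in descending key order.
-- intended difference: On grids with more rows than columns+1 (len(lines) > len(cols)+1), A's diagonals that start in column 0 run past column len(cols)-1 and return characters read beyond the declared grid width, while B clips every diagonal to the len(cols) columns of the grid, which is the intended rectangular-grid semantics. — e.g. on get_diag_south_east(["a", "b", "cd"], ["x"]): A returns ["c", "bd", "a"], B returns ["c", "b", "a"]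
import Mathlib
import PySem

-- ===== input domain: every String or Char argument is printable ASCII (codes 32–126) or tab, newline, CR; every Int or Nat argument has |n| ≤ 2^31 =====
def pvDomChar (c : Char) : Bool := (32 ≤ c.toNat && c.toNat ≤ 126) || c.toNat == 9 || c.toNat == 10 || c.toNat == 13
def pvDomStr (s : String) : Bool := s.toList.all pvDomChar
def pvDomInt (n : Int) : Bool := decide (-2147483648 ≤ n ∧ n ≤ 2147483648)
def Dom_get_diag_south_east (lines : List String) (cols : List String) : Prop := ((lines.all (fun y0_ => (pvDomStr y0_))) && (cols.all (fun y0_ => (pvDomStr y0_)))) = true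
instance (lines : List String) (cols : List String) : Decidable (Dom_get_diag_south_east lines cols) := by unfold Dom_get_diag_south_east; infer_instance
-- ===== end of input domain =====

-- B replaces A's two per-diagonal scans by one row-major pass into dict buckets keyed by r-c; on grids with
-- more rows than columns+1, A's column-0 diagonals read past the grid width and B clips them to len(cols) columns.


-- ===== PORT A =====
-- lines[r][c], total form (Pre_ guarantees every access either port makes is in range)
def pvCell (lines : List String) (r c : Int) : Char :=
  PySem.List.pyGetD (PySem.List.pyGetD lines r "").toList c ' '

def get_diag_south_east (lines : List String) (cols : List String) : List String :=
  let n : Int := lines.length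
  let m : Int := cols.length
  let diag1 :=
    (PySem.List.pyRange (n - 1) 0 (-1)).foldl (fun acc i =>
      acc ++ [String.ofList ((PySem.List.enumerate (PySem.List.pyRange i n 1)).foldl
        (fun elt p => elt ++ [pvCell lines p.2 p.1]) [])]) []
  (PySem.List.pyRange 0 m 1).foldl (fun acc i =>
    acc ++ [String.ofList ((PySem.List.enumerate (PySem.List.pyRange i m 1)).foldl
      (fun elt p => elt ++ [pvCell lines p.1 p.2]) [])]) diag1

-- ===== PORT B =====
def get_diag_south_east_alt (lines : List String) (cols : List String) : List String :=
  let n : Int := lines.length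
  let m : Int := cols.length
  let buckets : PySem.Dict Int (List Char) :=
    (PySem.List.pyRange 0 n 1).foldl (fun bk r =>
      (PySem.List.pyRange 0 m 1).foldl (fun bk c =>
        bk.insert (r - c) (bk.getD (r - c) [] ++
          [PySem.List.pyGetD (PySem.List.pyGetD lines r "").toList c ' '])) bk)
      PySem.Dict.empty
  (PySem.List.pyRange (n - 1) (-m) (-1)).map (fun d => String.ofList (buckets.getD d []))

-- ===== PRECONDITION & SPEC =====
-- Pre_ is exactly the set of inputs on which the Python A returns (no IndexError):
-- at most as many columns as lines, every line j ≥ 1 has at least j characters,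
-- and every line j < len(cols) has at least len(cols) characters.
def Pre_get_diag_south_east (lines : List String) (cols : List String) : Prop :=
  cols.length ≤ lines.length ∧
  (∀ j : Nat, j < lines.length → 1 ≤ j → j ≤ (lines.getD j "").toList.length) ∧
  (∀ j : Nat, j < cols.length → cols.length ≤ (lines.getD j "").toList.length)
instance (lines : List String) (cols : List String) : Decidable (Pre_get_diag_south_east lines cols) := by unfold Pre_get_diag_south_east; infer_instance

def pvWitness_get_diag_south_east : List String × List String := (["ab", "cd"], ["ac", "bd"])

-- On grids with more rows than columns+1, A's diagonals starting in column 0 run past column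
-- len(cols)-1 and return characters read beyond the declared grid width; B clips every diagonal
-- to the len(cols) columns of the grid, the intended rectangular-grid semantics.
def D_get_diag_south_east (lines : List String) (cols : List String) : Prop :=
  cols.length + 1 < lines.length
instance (lines : List String) (cols : List String) : Decidable (D_get_diag_south_east lines cols) := by unfold D_get_diag_south_east; infer_instance

def Spec_get_diag_south_east (lines : List String) (cols : List String) (out : List String) : Prop := ¬ D_get_diag_south_east lines cols → out = get_diag_south_east_alt lines cols
instance (lines : List String) (cols : List String) (out : List String) : Decidable (Spec_get_diag_south_east lines cols out) := by unfold Spec_get_diag_south_east; infer_instance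

def pvDiffWitness_get_diag_south_east : List String × List String := (["a", "b", "cd"], ["x"])
def pvDiffWitnessOut_get_diag_south_east : (List String) × (List String) := (["c", "bd", "a"], ["c", "b", "a"])

-- ===== CLAIM (what is proved, stated in full; the proofs are below) =====
def Claim_unchanged_get_diag_south_east : Prop := ∀ (lines : List String) (cols : List String), Dom_get_diag_south_east lines cols → Pre_get_diag_south_east lines cols → Spec_get_diag_south_east lines cols (get_diag_south_east lines cols)
def Claim_changed_get_diag_south_east : Prop := Dom_get_diag_south_east (pvDiffWitness_get_diag_south_east.1) (pvDiffWitness_get_diag_south_east.2) ∧ Pre_get_diag_south_east (pvDiffWitness_get_diag_south_east.1) (pvDiffWitness_get_diag_south_east.2) ∧ D_get_diag_south_east (pvDiffWitness_get_diag_south_east.1) (pvDiffWitness_get_diag_south_east.2) ∧ get_diag_south_east (pvDiffWitness_get_diag_south_east.1) (pvDiffWitness_get_diag_south_east.2) = pvDiffWitnessOut_get_diag_south_east.1 ∧ get_diag_south_east_alt (pvDiffWitness_get_diag_south_east.1) (pvDiffWitness_get_diag_south_east.2) = pvDiffWitnessOut_get_diag_south_east.2 ∧ pvDiffWitnessOut_get_diag_south_east.1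 ≠ pvDiffWitnessOut_get_diag_south_east.2
def Claim_exact_get_diag_south_east : Prop := ∀ (lines : List String) (cols : List String), Dom_get_diag_south_east lines cols → Pre_get_diag_south_east lines cols → D_get_diag_south_east lines cols → get_diag_south_east lines cols ≠ get_diag_south_east_alt lines cols

-- ===== LEMMAS AND PROOFS =====

-- the inner (column) loop of B: what one row leaves in bucket d
theorem pvInner_getD (g : Int → Char) (r : Int) (cs : List Int)
    (bk : PySem.Dict Int (List Char)) (d : Int) :
    (cs.foldl (fun bk c => bk.insert (r - c) (bk.getD (r - c) [] ++ [g c])) bk).getD d []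
      = bk.getD d [] ++ (cs.filter (fun c => decide (r - c = d))).map g := by
  induction cs generalizing bk with
  | nil => simp
  | cons c0 t ih =>
    simp only [List.foldl_cons, List.filter_cons]
    rw [ih]
    by_cases h : r - c0 = d
    · simp [h, List.append_assoc]
    · rw [PySem.Dict.getD_insert, if_neg (by omega : ¬ d = r - c0)]
      simp [h]

-- the outer (row) loop of B
theorem pvOuter_getD (lines : List String) (m : Int) (rs : List Int)
    (bk : PySem.Dict Int (List Char)) (d : Int) :
    (rs.foldl (fun bk r =>
        (PySem.List.pyRange 0 m 1).foldl (fun bk c =>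
          bk.insert (r - c) (bk.getD (r - c) [] ++
            [PySem.List.pyGetD (PySem.List.pyGetD lines r "").toList c ' '])) bk) bk).getD d []
      = bk.getD d [] ++ rs.flatMap (fun r =>
          ((PySem.List.pyRange 0 m 1).filter (fun c => decide (r - c = d))).map
            (fun c => PySem.List.pyGetD (PySem.List.pyGetD lines r "").toList c ' ')) := by
  induction rs generalizing bk with
  | nil => simp
  | cons r0 t ih =>
    simp only [List.foldl_cons, List.flatMap_cons]
    rw [ih, pvInner_getD]
    simp [List.append_assoc]

theorem pvFilter_eq_single {l : List Int} (hn : l.Nodup) (v : Int) :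
    l.filter (fun c => decide (c = v)) = if v ∈ l then [v] else [] := by
  induction l with
  | nil => simp
  | cons a t ih =>
    rcases List.nodup_cons.mp hn with ⟨ha, ht⟩
    by_cases h : a = v
    · subst h
      simp [ih ht, ha]
    · simp [h, ih ht, Ne.symm h]

theorem pvRowFilter (r d M : Int) :
    (PySem.List.pyRange 0 M 1).filter (fun c => decide (r - c = d))
      = if 0 ≤ r - d ∧ r - d < M then [r - d] else [] := by
  have h1 : (fun c : Int => decide (r - c = d)) = fun c => decide (c = r - d) := by
    funext c; rw [decide_eq_decide]; omega
  rw [h1, pvFilter_eq_single (PySem.List.nodup_pyRange_one 0 M) (r - d)]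
  simp [PySem.List.mem_pyRange_one]

theorem pvFlatMap_single {α β : Type} (l : List α) (f : α → β) :
    l.flatMap (fun x => [f x]) = l.map f := by
  induction l with
  | nil => rfl
  | cons a t ih => simp [ih]

theorem pvFlatMap_congr_mem {α β : Type} {l : List α} {f g : α → List β}
    (h : ∀ x ∈ l, f x = g x) : l.flatMap f = l.flatMap g := by
  induction l with
  | nil => rfl
  | cons a t ih =>
    simp only [List.flatMap_cons]
    rw [h a (by simp), ih (fun x hx => h x (by simp [hx]))]

theorem pvEnum_pyRange (a b s : Int) :
    PySem.List.enumerate (PySem.List.pyRange a b 1) s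
      = (PySem.List.pyRange a b 1).map (fun c => (s + (c - a), c)) := by
  generalize hk : (b - a).toNat = k
  induction k generalizing a s with
  | zero =>
    have hba : b ≤ a := by omega
    simp [PySem.List.pyRange_one_eq_nil hba, PySem.List.enumerate_nil]
  | succ k ih =>
    have hab : a < b := by omega
    rw [PySem.List.pyRange_one_cons hab, PySem.List.enumerate_cons, List.map_cons,
      ih (a + 1) (s + 1) (by omega)]
    congr 1
    · simp
    · apply List.map_congr_left
      intro c _
      congr 1
      ring

-- bucket d for 1 ≤ d with the clip d+m inside the row range: the full column range 0..m-1 fires for rows d..d+m-1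
theorem pvFlat_mid (g : Int → Char) (n m d : Int) (h1 : 1 ≤ d) (h2 : d ≤ n) :
    (PySem.List.pyRange 0 n 1).flatMap (fun r =>
        if 0 ≤ r - d ∧ r - d < m then [g r] else [])
      = (PySem.List.pyRange d (min n (d + m)) 1).map g := by
  by_cases hm : 0 ≤ m
  · have hsplit1 : PySem.List.pyRange 0 n 1
        = PySem.List.pyRange 0 d 1 ++ PySem.List.pyRange d n 1 :=
      PySem.List.pyRange_one_append 0 d n (by omega) h2
    have hsplit2 : PySem.List.pyRange d n 1
        = PySem.List.pyRange d (min n (d + m)) 1 ++ PySem.List.pyRange (min n (d + m)) n 1 :=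
      PySem.List.pyRange_one_append d (min n (d + m)) n (by omega) (by omega)
    rw [hsplit1, List.flatMap_append, hsplit2, List.flatMap_append]
    have hA : (PySem.List.pyRange 0 d 1).flatMap (fun r =>
        if 0 ≤ r - d ∧ r - d < m then [g r] else []) = [] := by
      rw [List.flatMap_eq_nil_iff]
      intro r hr
      rw [PySem.List.mem_pyRange_one] at hr
      rw [if_neg (by omega)]
    have hB : (PySem.List.pyRange d (min n (d + m)) 1).flatMap (fun r =>
        if 0 ≤ r - d ∧ r - d < m then [g r] else [])
        = (PySem.List.pyRange d (min n (d + m)) 1).map g := by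
      rw [pvFlatMap_congr_mem (g := fun r => [g r])]
      · exact pvFlatMap_single _ _
      · intro r hr
        rw [PySem.List.mem_pyRange_one] at hr
        rw [if_pos (by omega)]
    have hC : (PySem.List.pyRange (min n (d + m)) n 1).flatMap (fun r =>
        if 0 ≤ r - d ∧ r - d < m then [g r] else []) = [] := by
      rw [List.flatMap_eq_nil_iff]
      intro r hr
      rw [PySem.List.mem_pyRange_one] at hr
      rw [if_neg (by omega)]
    rw [hA, hB, hC, List.nil_append, List.append_nil]
  · have hmin : min n (d + m) ≤ d := by omega
    rw [PySem.List.pyRange_one_eq_nil hmin, List.map_nil, List.flatMap_eq_nil_iff]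
    intro r _
    rw [if_neg (by omega)]

theorem pvFlat_high (g : Int → Char) (n m d : Int) (hd0 : d ≤ 0) (hdm : -m < d)
    (hmn : m ≤ n) :
    (PySem.List.pyRange 0 n 1).flatMap (fun r =>
        if 0 ≤ r - d ∧ r - d < m then [g r] else [])
      = (PySem.List.pyRange 0 (m + d) 1).map g := by
  rw [PySem.List.pyRange_one_append 0 (m + d) n (by omega) (by omega), List.flatMap_append]
  have hA : (PySem.List.pyRange 0 (m + d) 1).flatMap (fun r =>
      if 0 ≤ r - d ∧ r - d < m then [g r] else [])
      = (PySem.List.pyRange 0 (m + d) 1).map g := by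
    rw [pvFlatMap_congr_mem (g := fun r => [g r])]
    · exact pvFlatMap_single _ _
    · intro r hr
      rw [PySem.List.mem_pyRange_one] at hr
      rw [if_pos (by omega)]
  have hB : (PySem.List.pyRange (m + d) n 1).flatMap (fun r =>
      if 0 ≤ r - d ∧ r - d < m then [g r] else []) = [] := by
    rw [List.flatMap_eq_nil_iff]
    intro r hr
    rw [PySem.List.mem_pyRange_one] at hr
    rw [if_neg (by omega)]
  rw [hA, hB, List.append_nil]

theorem pvRange_shift (a b : Int) :
    PySem.List.pyRange a b 1 = (PySem.List.pyRange 0 (b - a) 1).map (fun k => k + a) := by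
  rw [PySem.List.pyRange_one, PySem.List.pyRange_one, List.map_map]
  have : (b - a - 0).toNat = (b - a).toNat := by omega
  rw [this]
  apply List.map_congr_left
  intro k _
  simp
  ring

theorem pvRowFilterMap (gf : Int → Char) (r d M : Int) :
    ((PySem.List.pyRange 0 M 1).filter (fun c => decide (r - c = d))).map gf
      = if 0 ≤ r - d ∧ r - d < M then [gf (r - d)] else [] := by
  rw [pvRowFilter]
  split_ifs <;> simp

theorem pvRange_neg (m : Int) :
    PySem.List.pyRange 0 (-m) (-1) = (PySem.List.pyRange 0 m 1).map (fun i => -i) := by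
  rw [PySem.List.pyRange_neg_one, PySem.List.pyRange_one, List.map_map]
  have h : (0 - -m).toNat = (m - 0).toNat := by omega
  rw [h]
  apply List.map_congr_left
  intro k _
  simp

-- B's bucket d, closed form (valid under m ≤ n, for every d the output range visits)
theorem pvBucket (lines : List String) (cols : List String) (d : Int)
    (hmn : (cols.length : Int) ≤ (lines.length : Int)) (hd : -(cols.length : Int) < d)
    (hdn : d ≤ (lines.length : Int)) :
    (((PySem.List.pyRange 0 (lines.length : Int) 1).foldl (fun bk r =>
        (PySem.List.pyRange 0 (cols.length : Int) 1).foldl (fun bk c =>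
          bk.insert (r - c) (bk.getD (r - c) [] ++
            [PySem.List.pyGetD (PySem.List.pyGetD lines r "").toList c ' '])) bk)
        (PySem.Dict.empty : PySem.Dict Int (List Char))).getD d [])
      = if 1 ≤ d then
          (PySem.List.pyRange d (min (lines.length : Int) (d + cols.length)) 1).map
            (fun r => pvCell lines r (r - d))
        else
          (PySem.List.pyRange 0 ((cols.length : Int) + d) 1).map
            (fun r => pvCell lines r (r - d)) := by
  rw [pvOuter_getD]
  simp only [PySem.Dict.getD_empty, List.nil_append, pvRowFilterMap]
  by_cases h1 : 1 ≤ d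
  · rw [if_pos h1]
    have := pvFlat_mid (fun r => pvCell lines r (r - d)) (lines.length : Int)
      (cols.length : Int) d h1 hdn
    simpa [pvCell] using this
  · rw [if_neg h1]
    have := pvFlat_high (fun r => pvCell lines r (r - d)) (lines.length : Int)
      (cols.length : Int) d (by omega) (by omega) hmn
    simpa [pvCell] using this

theorem get_diag_south_east_spec : Claim_unchanged_get_diag_south_east := by
  intro lines cols _ hpre hnD
  obtain ⟨hmn, -, -⟩ := hpre
  unfold get_diag_south_east get_diag_south_east_alt
  simp only [PySem.List.foldl_append_singleton_eq_map, List.nil_append]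
  set n : Int := (lines.length : Int) with hn
  set m : Int := (cols.length : Int) with hm
  have hm0 : (0:Int) ≤ m := by positivity
  have hmn' : m ≤ n := by omega
  have hnm1 : n ≤ m + 1 := by
    unfold D_get_diag_south_east at hnD
    omega
  by_cases hn1 : lines.length = 0
  · have hm1 : cols.length = 0 := by omega
    simp only [hn, hm, hn1, hm1]
    norm_num
  · have hn0 : (1:Int) ≤ n := by omega
    have hB : PySem.List.pyRange (n-1) (-m) (-1)
        = PySem.List.pyRange (n-1) 0 (-1) ++ PySem.List.pyRange 0 (-m) (-1) := by
      rw [PySem.List.pyRange_neg_one_eq_reverse (n-1) (-m),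
        PySem.List.pyRange_neg_one_eq_reverse (n-1) 0,
        PySem.List.pyRange_neg_one_eq_reverse 0 (-m), ← List.reverse_append,
        ← PySem.List.pyRange_one_append (-m+1) (0+1) (n-1+1) (by omega) (by omega)]
    rw [hB, List.map_append]
    congr 1
    · apply List.map_congr_left
      intro i hi
      rw [PySem.List.mem_pyRange_neg_one] at hi
      rw [pvBucket lines cols i (by omega) (by omega) (by omega), if_pos (by omega)]
      have hmin : min n (i + m) = n := by omega
      rw [← hn, ← hm, hmin]
      rw [pvEnum_pyRange i n 0, List.map_map]
      congr 1
      apply List.map_congr_left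
      intro r _
      simp only [Function.comp]
      norm_num
    · rw [pvRange_neg m, List.map_map]
      apply List.map_congr_left
      intro i hi
      rw [PySem.List.mem_pyRange_one] at hi
      simp only [Function.comp]
      rw [pvBucket lines cols (-i) (by omega) (by omega) (by omega), if_neg (by omega), ← hm]
      rw [pvEnum_pyRange i m 0, List.map_map]
      have em : m + -i = m - i := by ring
      rw [em, pvRange_shift i m, List.map_map]
      congr 1
      apply List.map_congr_left
      intro k _
      simp only [Function.comp]
      have e1 : (0:Int) + (k + i - i) = k := by ring
      have e2 : k - -i = k + i := by ring
      rw [e1, e2]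

theorem get_diag_south_east_changed : Claim_changed_get_diag_south_east := by
  unfold Claim_changed_get_diag_south_east
  decide

theorem get_diag_south_east_tight : Claim_exact_get_diag_south_east := by
  intro lines cols _ hpre hD heq
  obtain ⟨hmn, -, -⟩ := hpre
  unfold D_get_diag_south_east at hD
  set n : Int := (lines.length : Int) with hn
  set m : Int := (cols.length : Int) with hm
  have hm0 : (0:Int) ≤ m := by positivity
  have hnm : m + 1 < n := by omega
  -- compare the entries at index n-2 (the diagonal starting at row 1, column 0)
  set k : Nat := lines.length - 2 with hk
  have hkn : (k : Int) = n - 2 := by omega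
  unfold get_diag_south_east get_diag_south_east_alt at heq
  simp only [PySem.List.foldl_append_singleton_eq_map, List.nil_append] at heq
  have h2 := congrArg (fun l => l[k]?) heq
  simp only at h2
  -- A side
  rw [List.getElem?_append_left (by
    rw [List.length_map, PySem.List.length_pyRange_neg_one]
    omega)] at h2
  rw [PySem.List.pyRange_neg_one, List.map_map, List.getElem?_map,
    List.getElem?_range (by omega : k < (n - 1 - 0).toNat)] at h2
  -- B side
  rw [PySem.List.pyRange_neg_one, List.map_map, List.getElem?_map,
    List.getElem?_range (by omega : k < (n - 1 - -m).toNat)] at h2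
  simp only [Option.map_some, Option.some.injEq, Function.comp] at h2
  have hone : n - 1 - (k : Int) = 1 := by omega
  rw [hone] at h2
  have hlen := congrArg (fun s => s.toList.length) h2
  simp only at hlen
  rw [String.toList_ofList, String.toList_ofList,
    pvBucket lines cols 1 (by omega) (by omega) (by omega), if_pos (le_refl 1), ← hn, ← hm] at hlen
  have hminv : min n (1 + m) = 1 + m := by omega
  rw [hminv] at hlen
  simp only [List.length_map, PySem.List.length_enumerate,
    PySem.List.length_pyRange_one] at hlen
  omega
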